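-- pv_equiv track=rewrite | github.com/soham0209/Jacobi3D_CGAL | data_generator.py | intersectSphere
-- ===== SOURCE A (Python) =====
-- def intersectSphere(nx,ny,nz,centre,r_sqr):
--     mean = list()
--     for z in range(int(centre[2]) + 1,nz+1):
--         for y in range(1,ny+1):
--             for x in range(1,nx+1):
--                 if doesIntersect(x,y,z,r_sqr,centre):
--                     mean.append((x,y,z))
--
--     return mean
--
-- def doesIntersect(x, y, z,r_sqr,centre):
--     corners = list()
--     is_outside = 0
--     corners.append((x, y, z))
--     corners.append((x - 1, y, z))
--     corners.append((x, y - 1, z))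
--     corners.append((x - 1, y - 1, z))
--     corners.append((x, y, z - 1))
--     corners.append((x - 1, y, z - 1))
--     corners.append((x, y - 1, z - 1))
--     corners.append((x - 1, y - 1, z-1))
--     for coor in corners:
--         dist = (coor[0]-centre[0])**2 + (coor[1]-centre[1])**2 + (coor[2]-centre[2])**2 - r_sqr
--         if dist > 0:
--             is_outside = is_outside + 1
--         else:
--             is_outside = is_outside - 1
--     if is_outside == 8 or is_outside ==-8:
--         return False
--     else:
--         return True
-- ===== SOURCE B (Python) =====
-- # B: per (y,z) row, compute the straddling x-cells in closed form (integer sqrt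
-- # of the four corner radii) and emit only the two boundary runs, instead of
-- # testing every x cell's 8 corners.
--
-- def _isqrt(n):
--     # floor square root by binary search (n >= 0)
--     lo, hi = 0, n + 1
--     while hi - lo > 1:
--         mid = (lo + hi) // 2
--         if mid * mid <= n:
--             lo = mid
--         else:
--             hi = mid
--     return lo
--
-- def intersectSphere(nx, ny, nz, centre, r_sqr):
--     cx, cy, cz = centre[0], centre[1], centre[2]
--     out = []
--     for z in range(int(cz) + 1, nz + 1):
--         for y in range(1, ny + 1):
--             r00 = r_sqr - (y - 1 - cy) ** 2 - (z - 1 - cz) ** 2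
--             r01 = r_sqr - (y - 1 - cy) ** 2 - (z - cz) ** 2
--             r10 = r_sqr - (y - cy) ** 2 - (z - 1 - cz) ** 2
--             r11 = r_sqr - (y - cy) ** 2 - (z - cz) ** 2
--             rmax = max(r00, r01, r10, r11)
--             rmin = min(r00, r01, r10, r11)
--             if rmax < 0:
--                 continue
--             big = _isqrt(rmax)
--             if rmin < 0:
--                 runs = [(cx - big, cx + big + 1)]
--             else:
--                 small = _isqrt(rmin)
--                 runs = [(cx - big, cx - small), (cx + small + 1, cx + big + 1)]
--             for a, b in runs:
--                 for x in range(max(a, 1), min(b, nx) + 1):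
--                     out.append((x, y, z))
--     return out
-- ===== Notes on version B (the rewrite author's own statement) =====
-- stated objective: faster
-- what changed: Instead of scanning every x cell of every (y,z) row and running the 8-corner sign test per cell, B computes for each (y,z) row the four corner radii in closed form, takes integer square roots by binary search, and emits only the two boundary runs of x cells directly.
-- outside the precondition, e.g. on intersectSphere(2, 2, 2, [1, 1], 4): A raises IndexError, B raises IndexError
import Mathlib
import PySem

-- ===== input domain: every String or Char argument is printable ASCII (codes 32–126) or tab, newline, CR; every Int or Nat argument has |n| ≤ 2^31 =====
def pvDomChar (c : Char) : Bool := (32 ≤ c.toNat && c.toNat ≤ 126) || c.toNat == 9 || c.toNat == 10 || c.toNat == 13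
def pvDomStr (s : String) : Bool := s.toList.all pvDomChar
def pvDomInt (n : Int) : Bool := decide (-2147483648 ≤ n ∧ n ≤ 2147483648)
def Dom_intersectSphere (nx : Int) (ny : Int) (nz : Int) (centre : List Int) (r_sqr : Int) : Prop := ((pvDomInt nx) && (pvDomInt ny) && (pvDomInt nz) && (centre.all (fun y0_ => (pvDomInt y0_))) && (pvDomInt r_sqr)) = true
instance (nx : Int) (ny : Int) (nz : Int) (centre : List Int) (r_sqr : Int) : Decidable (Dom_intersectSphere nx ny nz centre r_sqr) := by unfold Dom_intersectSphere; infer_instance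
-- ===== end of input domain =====

-- B replaces A's full x-scan with an 8-corner test per cell by a closed-form
-- per-(y,z)-row computation (integer square roots of the four corner radii)
-- that emits only the two boundary runs of x cells; measured faster (asymptotic: O(nx·ny·nz) → O(ny·nz·log nx + output)).

-- ===== PORT A =====
def doesIntersect (x : Int) (y : Int) (z : Int) (r_sqr : Int) (centre : List Int) : Bool :=
  let corners : List (Int × Int × Int) :=
    [(x, y, z), (x - 1, y, z), (x, y - 1, z), (x - 1, y - 1, z),
     (x, y, z - 1), (x - 1, y, z - 1), (x, y - 1, z - 1), (x - 1, y - 1, z - 1)]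
  let is_outside : Int := corners.foldl (fun acc coor =>
    let dist := (coor.1 - PySem.List.pyGetD centre 0 0) ^ 2
      + (coor.2.1 - PySem.List.pyGetD centre 1 0) ^ 2
      + (coor.2.2 - PySem.List.pyGetD centre 2 0) ^ 2 - r_sqr
    if dist > 0 then acc + 1 else acc - 1) 0
  if is_outside = 8 ∨ is_outside = -8 then false else true

def intersectSphere (nx : Int) (ny : Int) (nz : Int) (centre : List Int) (r_sqr : Int) : List (Int × Int × Int) :=
  (PySem.List.pyRange (PySem.List.pyGetD centre 2 0 + 1) (nz + 1) 1).foldl (fun mean z =>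
    (PySem.List.pyRange 1 (ny + 1) 1).foldl (fun mean y =>
      (PySem.List.pyRange 1 (nx + 1) 1).foldl (fun mean x =>
        if doesIntersect x y z r_sqr centre then mean ++ [(x, y, z)] else mean) mean) mean) []

-- ===== PORT B =====
-- binary-search floor square root (Source B's _isqrt while-loop; the Nat argument is
-- plain loop fuel — (n+1).toNat bounds the shrinking bracket width, so the loop
-- always terminates by its own exit test before the fuel runs out)
def isqrtGo (n : Int) : Nat → Int → Int → Int
  | fuel + 1, lo, hi =>
    if hi - lo > 1 then
      let mid := PySem.Int.floordiv (lo + hi) 2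
      if mid * mid ≤ n then isqrtGo n fuel mid hi else isqrtGo n fuel lo mid
    else lo
  | 0, lo, _ => lo

def isqrtB (n : Int) : Int := isqrtGo n (n + 1).toNat 0 (n + 1)

def intersectSphere_alt (nx : Int) (ny : Int) (nz : Int) (centre : List Int) (r_sqr : Int) : List (Int × Int × Int) :=
  let cx := PySem.List.pyGetD centre 0 0
  let cy := PySem.List.pyGetD centre 1 0
  let cz := PySem.List.pyGetD centre 2 0
  (PySem.List.pyRange (cz + 1) (nz + 1) 1).foldl (fun out z =>
    (PySem.List.pyRange 1 (ny + 1) 1).foldl (fun out y =>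
      let r00 := r_sqr - (y - 1 - cy) ^ 2 - (z - 1 - cz) ^ 2
      let r01 := r_sqr - (y - 1 - cy) ^ 2 - (z - cz) ^ 2
      let r10 := r_sqr - (y - cy) ^ 2 - (z - 1 - cz) ^ 2
      let r11 := r_sqr - (y - cy) ^ 2 - (z - cz) ^ 2
      let rmax := max (max (max r00 r01) r10) r11
      let rmin := min (min (min r00 r01) r10) r11
      if rmax < 0 then out
      else
        let big := isqrtB rmax
        let runs : List (Int × Int) :=
          if rmin < 0 then [(cx - big, cx + big + 1)]
          else
            let small := isqrtB rmin
            [(cx - big, cx - small), (cx + small + 1, cx + big + 1)]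
        runs.foldl (fun out ab =>
          (PySem.List.pyRange (max ab.1 1) (min ab.2 nx + 1) 1).foldl
            (fun out x => out ++ [(x, y, z)]) out) out) out) []

-- ===== PRECONDITION & SPEC =====
-- Pre_ excludes only centres with fewer than 3 coordinates, on which the Python A raises IndexError.
def Pre_intersectSphere (nx : Int) (ny : Int) (nz : Int) (centre : List Int) (r_sqr : Int) : Prop :=
  3 ≤ centre.length
instance (nx : Int) (ny : Int) (nz : Int) (centre : List Int) (r_sqr : Int) : Decidable (Pre_intersectSphere nx ny nz centre r_sqr) := by unfold Pre_intersectSphere; infer_instance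

def pvWitness_intersectSphere : Int × Int × Int × List Int × Int := (2, 2, 2, [1, 1, 0], 1)

def Spec_intersectSphere (nx : Int) (ny : Int) (nz : Int) (centre : List Int) (r_sqr : Int) (out : List (Int × Int × Int)) : Prop := out = intersectSphere_alt nx ny nz centre r_sqr
instance (nx : Int) (ny : Int) (nz : Int) (centre : List Int) (r_sqr : Int) (out : List (Int × Int × Int)) : Decidable (Spec_intersectSphere nx ny nz centre r_sqr out) := by unfold Spec_intersectSphere; infer_instance

-- ===== CLAIM (what is proved, stated in full; the proofs are below) =====
def Claim_equal_intersectSphere : Prop := ∀ (nx : Int) (ny : Int) (nz : Int) (centre : List Int) (r_sqr : Int), Dom_intersectSphere nx ny nz centre r_sqr → Pre_intersectSphere nx ny nz centre r_sqr → Spec_intersectSphere nx ny nz centre r_sqr (intersectSphere nx ny nz centre r_sqr)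

-- ===== LEMMAS AND PROOFS =====

lemma foldl_pm {A : Type} (p : A → Prop) [DecidablePred p] (l : List A) (a : Int) :
    l.foldl (fun acc x => if p x then acc + 1 else acc - 1) a
      = a + 2 * (l.countP (fun x => decide (p x)) : Int) - l.length := by
  induction l generalizing a with
  | nil => simp
  | cons h t ih => by_cases hp : p h <;> simp [hp, ih] <;> ring


set_option maxHeartbeats 1000000 in
lemma P_char (x y z r : Int) (centre : List Int) (c0 c1 c2 : Int)
    (h0 : PySem.List.pyGetD centre 0 0 = c0) (h1 : PySem.List.pyGetD centre 1 0 = c1)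
    (h2 : PySem.List.pyGetD centre 2 0 = c2) :
    (doesIntersect x y z r centre = true) ↔
      (((x - 1 - c0) ^ 2 ≤ max (max (max (r - (y - 1 - c1) ^ 2 - (z - 1 - c2) ^ 2) (r - (y - 1 - c1) ^ 2 - (z - c2) ^ 2)) (r - (y - c1) ^ 2 - (z - 1 - c2) ^ 2)) (r - (y - c1) ^ 2 - (z - c2) ^ 2) ∨ (x - c0) ^ 2 ≤ max (max (max (r - (y - 1 - c1) ^ 2 - (z - 1 - c2) ^ 2) (r - (y - 1 - c1) ^ 2 - (z - c2) ^ 2)) (r - (y - c1) ^ 2 - (z - 1 - c2) ^ 2)) (r - (y - c1) ^ 2 - (z - c2) ^ 2)) ∧ ¬((x - 1 - c0) ^ 2 ≤ min (min (min (r - (y - 1 - c1) ^ 2 - (z - 1 - c2) ^ 2) (r - (y - 1 - c1) ^ 2 - (z - c2) ^ 2)) (r - (y - c1) ^ 2 - (z - 1 - c2) ^ 2)) (r - (y - c1) ^ 2 - (z - c2) ^ 2) ∧ (x - c0) ^ 2 ≤ min (min (min (r - (y - 1 - c1) ^ 2 - (z - 1 - c2) ^ 2) (r - (y - 1 - c1)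 ^ 2 - (z - c2) ^ 2)) (r - (y - c1) ^ 2 - (z - 1 - c2) ^ 2)) (r - (y - c1) ^ 2 - (z - c2) ^ 2))) := by
  simp only [doesIntersect, h0, h1, h2]
  rw [foldl_pm (fun coor : Int × Int × Int =>
    (coor.1 - c0) ^ 2 + (coor.2.1 - c1) ^ 2 + (coor.2.2 - c2) ^ 2 - r > 0)]
  have hle := List.countP_le_length (p := fun coor : Int × Int × Int => decide ((coor.1 - c0) ^ 2 + (coor.2.1 - c1) ^ 2 + (coor.2.2 - c2) ^ 2 - r > 0))
    (l := [(x, y, z), (x - 1, y, z), (x, y - 1, z), (x - 1, y - 1, z),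
      (x, y, z - 1), (x - 1, y, z - 1), (x, y - 1, z - 1), (x - 1, y - 1, z - 1)])
  have hall := List.countP_eq_length (p := fun coor : Int × Int × Int => decide ((coor.1 - c0) ^ 2 + (coor.2.1 - c1) ^ 2 + (coor.2.2 - c2) ^ 2 - r > 0))
    (l := [(x, y, z), (x - 1, y, z), (x, y - 1, z), (x - 1, y - 1, z),
      (x, y, z - 1), (x - 1, y, z - 1), (x, y - 1, z - 1), (x - 1, y - 1, z - 1)])
  have hzero := List.countP_eq_zero (p := fun coor : Int × Int × Int => decide ((coor.1 - c0) ^ 2 + (coor.2.1 - c1) ^ 2 + (coor.2.2 - c2) ^ 2 - r > 0))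
    (l := [(x, y, z), (x - 1, y, z), (x, y - 1, z), (x - 1, y - 1, z),
      (x, y, z - 1), (x - 1, y, z - 1), (x, y - 1, z - 1), (x - 1, y - 1, z - 1)])
  simp only [List.length_cons, List.length_nil, List.mem_cons, List.not_mem_nil, or_false,
    forall_eq_or_imp, forall_eq, decide_eq_true_eq, gt_iff_lt, not_lt] at hle hall hzero ⊢
  generalize hc : List.countP _ _ = C at hle hall hzero ⊢
  generalize (x - 1 - c0) ^ 2 = a1 at hall hzero ⊢
  generalize (x - c0) ^ 2 = a2 at hall hzero ⊢
  generalize (y - 1 - c1) ^ 2 = b1 at hall hzero ⊢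
  generalize (y - c1) ^ 2 = b2 at hall hzero ⊢
  generalize (z - 1 - c2) ^ 2 = d1 at hall hzero ⊢
  generalize (z - c2) ^ 2 = d2 at hall hzero ⊢
  have hmax : ∀ A B C D : Int, A ≤ max (max (max A B) C) D ∧ B ≤ max (max (max A B) C) D ∧
      C ≤ max (max (max A B) C) D ∧ D ≤ max (max (max A B) C) D ∧
      (max (max (max A B) C) D = A ∨ max (max (max A B) C) D = B ∨ max (max (max A B) C) D = C ∨ max (max (max A B) C) D = D) := by
    intro A B C D; omega
  have hmin : ∀ A B C D : Int, min (min (min A B) C) D ≤ A ∧ min (min (min A B) C) D ≤ B ∧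
      min (min (min A B) C) D ≤ C ∧ min (min (min A B) C) D ≤ D ∧
      (min (min (min A B) C) D = A ∨ min (min (min A B) C) D = B ∨ min (min (min A B) C) D = C ∨ min (min (min A B) C) D = D) := by
    intro A B C D; omega
  obtain ⟨u1, u2, u3, u4, u5⟩ := hmax (r - b1 - d1) (r - b1 - d2) (r - b2 - d1) (r - b2 - d2)
  obtain ⟨v1, v2, v3, v4, v5⟩ := hmin (r - b1 - d1) (r - b1 - d2) (r - b2 - d1) (r - b2 - d2)
  generalize hG : max (max (max (r - b1 - d1) (r - b1 - d2)) (r - b2 - d1)) (r - b2 - d2) = M at u1 u2 u3 u4 u5 ⊢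
  generalize hH : min (min (min (r - b1 - d1) (r - b1 - d2)) (r - b2 - d1)) (r - b2 - d2) = m at v1 v2 v3 v4 v5 ⊢
  clear hG hH hmax hmin hc
  split_ifs with hcond
  · simp only [false_iff]
    have hC : C = 8 ∨ C = 0 := by omega
    clear hcond hle
    rcases hC with h8 | h0
    · have hout := hall.mp h8
      clear hall hzero u1 u2 u3 u4 v1 v2 v3 v4 v5
      omega
    · have hin := hzero.mp h0
      clear hall hzero u1 u2 u3 u4 u5 v1 v2 v3 v4
      omega
  · simp only [true_iff]
    have hC : C ≠ 8 ∧ C ≠ 0 := by omega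
    have hno : ¬ _ := fun h => hC.1 (hall.mpr h)
    have hn0 : ¬ _ := fun h => hC.2 (hzero.mpr h)
    clear hall hzero hcond hC hle u5 v5
    constructor
    · clear hn0 v1 v2 v3 v4
      omega
    · clear hno u1 u2 u3 u4
      omega

-- the binary-search square root is exact
lemma isqrtGo_spec (n : Int) : ∀ (fuel : Nat) (lo hi : Int), (hi - lo).toNat ≤ fuel + 1 →
    0 ≤ lo → lo < hi → lo * lo ≤ n → n < hi * hi →
    0 ≤ isqrtGo n fuel lo hi ∧ isqrtGo n fuel lo hi * isqrtGo n fuel lo hi ≤ n ∧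
      n < (isqrtGo n fuel lo hi + 1) * (isqrtGo n fuel lo hi + 1) := by
  intro fuel
  induction fuel with
  | zero =>
    intro lo hi hgap h0 hlh hl hh
    have : hi = lo + 1 := by omega
    subst this
    simp only [isqrtGo]
    exact ⟨h0, hl, hh⟩
  | succ fuel ih =>
    intro lo hi hgap h0 hlh hl hh
    simp only [isqrtGo]
    split_ifs with h1 h2
    · have hmid : lo < PySem.Int.floordiv (lo + hi) 2 ∧ PySem.Int.floordiv (lo + hi) 2 < hi := by
        rw [PySem.Int.floordiv_eq_ediv_of_pos (by norm_num : (0:Int) < 2)]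
        omega
      exact ih _ _ (by omega) (by omega) hmid.2 h2 hh
    · have hmid : lo < PySem.Int.floordiv (lo + hi) 2 ∧ PySem.Int.floordiv (lo + hi) 2 < hi := by
        rw [PySem.Int.floordiv_eq_ediv_of_pos (by norm_num : (0:Int) < 2)]
        omega
      exact ih _ _ (by omega) h0 hmid.1 hl (by omega)
    · have : hi = lo + 1 := by omega
      subst this
      exact ⟨h0, hl, hh⟩

lemma isqrtB_spec (n : Int) (hn : 0 ≤ n) :
    0 ≤ isqrtB n ∧ isqrtB n * isqrtB n ≤ n ∧ n < (isqrtB n + 1) * (isqrtB n + 1) :=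
  isqrtGo_spec n (n + 1).toNat 0 (n + 1) (by omega) le_rfl (by omega) (by omega) (by nlinarith)

lemma sq_le_iff (R s t : Int) (hs : 0 ≤ s) (h1 : s * s ≤ R) (h2 : R < (s + 1) * (s + 1)) :
    t ^ 2 ≤ R ↔ -s ≤ t ∧ t ≤ s := by
  rw [pow_two]
  constructor
  · intro h
    constructor <;> by_contra hc <;> push_neg at hc <;> nlinarith
  · rintro ⟨ha, hb⟩; nlinarith

-- two strictly increasing integer lists with the same members are equal
lemma sorted_mem_eq (l₁ l₂ : List Int) (h₁ : l₁.Pairwise (· < ·)) (h₂ : l₂.Pairwise (· < ·))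
    (hm : ∀ t, t ∈ l₁ ↔ t ∈ l₂) : l₁ = l₂ := by
  refine PySem.List.eq_of_perm_of_pairwise_le_of_injective (fun t => t) (fun a b h => h) ?_ ?_ ?_
  · exact (List.perm_ext_iff_of_nodup h₁.nodup h₂.nodup).mpr hm
  · exact h₁.imp le_of_lt
  · exact h₂.imp le_of_lt

set_option maxHeartbeats 1000000 in
lemma row_eq (nx y z r : Int) (centre : List Int) (c0 c1 c2 : Int)
    (h0 : PySem.List.pyGetD centre 0 0 = c0) (h1 : PySem.List.pyGetD centre 1 0 = c1)
    (h2 : PySem.List.pyGetD centre 2 0 = c2) (acc : List (Int × Int × Int)) :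
    (PySem.List.pyRange 1 (nx + 1) 1).foldl
      (fun mean x => if doesIntersect x y z r centre = true then mean ++ [(x, y, z)] else mean) acc
    = (if max (max (max (r - (y - 1 - c1) ^ 2 - (z - 1 - c2) ^ 2) (r - (y - 1 - c1) ^ 2 - (z - c2) ^ 2)) (r - (y - c1) ^ 2 - (z - 1 - c2) ^ 2)) (r - (y - c1) ^ 2 - (z - c2) ^ 2) < 0 then acc
       else
         List.foldl (fun out ab =>
             (PySem.List.pyRange (max ab.1 1) (min ab.2 nx + 1) 1).foldl
               (fun out x => out ++ [(x, y, z)]) out) acc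
           (if min (min (min (r - (y - 1 - c1) ^ 2 - (z - 1 - c2) ^ 2) (r - (y - 1 - c1) ^ 2 - (z - c2) ^ 2)) (r - (y - c1) ^ 2 - (z - 1 - c2) ^ 2)) (r - (y - c1) ^ 2 - (z - c2) ^ 2) < 0 then [(c0 - isqrtB (max (max (max (r - (y - 1 - c1) ^ 2 - (z - 1 - c2) ^ 2) (r - (y - 1 - c1) ^ 2 - (z - c2) ^ 2)) (r - (y - c1) ^ 2 - (z - 1 - c2) ^ 2)) (r - (y - c1) ^ 2 - (z - c2) ^ 2)), c0 + isqrtB (max (max (max (r - (y - 1 - c1) ^ 2 - (z - 1 - c2) ^ 2) (r - (y - 1 - c1) ^ 2 - (z - c2) ^ 2)) (r - (y - c1) ^ 2 - (z - 1 - c2) ^ 2)) (r - (y - c1) ^ 2 - (z - c2) ^ 2)) + 1)]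
            else [(c0 - isqrtB (max (max (max (r - (y - 1 - c1) ^ 2 - (z - 1 - c2) ^ 2) (r - (y - 1 - c1) ^ 2 - (z - c2) ^ 2)) (r - (y - c1) ^ 2 - (z - 1 - c2) ^ 2)) (r - (y - c1) ^ 2 - (z - c2) ^ 2)), c0 - isqrtB (min (min (min (r - (y - 1 - c1) ^ 2 - (z - 1 - c2) ^ 2) (r - (y - 1 - c1) ^ 2 - (z - c2) ^ 2)) (r - (y - c1) ^ 2 - (z - 1 - c2) ^ 2)) (r - (y - c1) ^ 2 - (z - c2) ^ 2))), (c0 + isqrtB (min (min (min (r - (y - 1 - c1) ^ 2 - (z - 1 - c2) ^ 2) (r - (y - 1 - c1) ^ 2 - (z - c2) ^ 2)) (r - (y - c1) ^ 2 - (z - 1 - c2) ^ 2)) (r - (y - c1) ^ 2 - (z - c2) ^ 2)) + 1, c0 + isqrtB (max (max (max (r - (y - 1 - c1) ^ 2 - (z - 1 - c2) ^ 2) (r - (y - 1 - c1) ^ 2 - (z - c2) ^ 2)) (r - (y - c1) ^ 2 - (z - 1 - c2) ^ 2)) (r - (y - c1) ^ 2 - (z - c2) ^ 2)) + 1)]))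 := by
  rw [PySem.List.foldl_append_ite (p := fun x => doesIntersect x y z r centre = true) (f := fun x => (x, y, z))]
  have hchar : ∀ x : Int, (doesIntersect x y z r centre = true) ↔ _ := fun x => P_char x y z r centre c0 c1 c2 h0 h1 h2
  generalize hGM : (max (max (max (r - (y - 1 - c1) ^ 2 - (z - 1 - c2) ^ 2) (r - (y - 1 - c1) ^ 2 - (z - c2) ^ 2)) (r - (y - c1) ^ 2 - (z - 1 - c2) ^ 2)) (r - (y - c1) ^ 2 - (z - c2) ^ 2)) = M at *
  generalize hGm : (min (min (min (r - (y - 1 - c1) ^ 2 - (z - 1 - c2) ^ 2) (r - (y - 1 - c1) ^ 2 - (z - c2) ^ 2)) (r - (y - c1) ^ 2 - (z - 1 - c2) ^ 2)) (r - (y - c1) ^ 2 - (z - c2) ^ 2)) = m at *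
  have hmM : m ≤ M := by rw [← hGM, ← hGm]; omega
  by_cases hM : M < 0
  · rw [if_pos hM]
    have : (PySem.List.pyRange 1 (nx + 1) 1).filter (fun x => decide (doesIntersect x y z r centre = true)) = [] := by
      rw [List.filter_eq_nil_iff]
      intro x _ hx
      rw [decide_eq_true_eq, hchar x] at hx
      have n1 : 0 ≤ (x - 1 - c0) ^ 2 := sq_nonneg _
      have n2 : 0 ≤ (x - c0) ^ 2 := sq_nonneg _
      omega
    rw [this]
    simp
  · rw [if_neg hM]
    push_neg at hM
    obtain ⟨hb0, hb1, hb2⟩ := isqrtB_spec M hM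
    have e1 : ∀ t : Int, t ^ 2 ≤ M ↔ -isqrtB M ≤ t ∧ t ≤ isqrtB M := fun t => sq_le_iff M (isqrtB M) t hb0 hb1 hb2
    by_cases hm : m < 0
    · rw [if_pos hm]
      simp only [List.foldl_cons, List.foldl_nil]
      rw [PySem.List.foldl_append_singleton_eq_map]
      have : (PySem.List.pyRange 1 (nx + 1) 1).filter (fun x => decide (doesIntersect x y z r centre = true))
          = PySem.List.pyRange (max (c0 - isqrtB M) 1) (min (c0 + isqrtB M + 1) nx + 1) 1 := by
        apply sorted_mem_eq
        · exact (PySem.List.pairwise_lt_pyRange_one 1 (nx + 1)).filter _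
        · exact PySem.List.pairwise_lt_pyRange_one _ _
        · intro t
          rw [List.mem_filter, decide_eq_true_eq, hchar t, PySem.List.mem_pyRange_one, PySem.List.mem_pyRange_one]
          have n1 : 0 ≤ (t - 1 - c0) ^ 2 := sq_nonneg _
          have n2 : 0 ≤ (t - c0) ^ 2 := sq_nonneg _
          rw [e1 (t - 1 - c0), e1 (t - c0)]
          constructor
          · rintro ⟨hr, hc, -⟩; omega
          · intro hr
            refine ⟨by omega, by omega, ?_⟩
            rintro ⟨ha, -⟩; omega
      rw [this]
    · rw [if_neg hm]
      push_neg at hm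
      obtain ⟨hs0, hs1, hs2⟩ := isqrtB_spec m hm
      have e2 : ∀ t : Int, t ^ 2 ≤ m ↔ -isqrtB m ≤ t ∧ t ≤ isqrtB m := fun t => sq_le_iff m (isqrtB m) t hs0 hs1 hs2
      have hsb : isqrtB m ≤ isqrtB M := by nlinarith
      simp only [List.foldl_cons, List.foldl_nil]
      rw [PySem.List.foldl_append_singleton_eq_map, PySem.List.foldl_append_singleton_eq_map]
      rw [List.append_assoc, ← List.map_append]
      have : (PySem.List.pyRange 1 (nx + 1) 1).filter (fun x => decide (doesIntersect x y z r centre = true))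
          = PySem.List.pyRange (max (c0 - isqrtB M) 1) (min (c0 - isqrtB m) nx + 1) 1
            ++ PySem.List.pyRange (max (c0 + isqrtB m + 1) 1) (min (c0 + isqrtB M + 1) nx + 1) 1 := by
        apply sorted_mem_eq
        · exact (PySem.List.pairwise_lt_pyRange_one 1 (nx + 1)).filter _
        · rw [List.pairwise_append]
          refine ⟨PySem.List.pairwise_lt_pyRange_one _ _, PySem.List.pairwise_lt_pyRange_one _ _, ?_⟩
          intro a ha b hb
          rw [PySem.List.mem_pyRange_one] at ha hb
          omega
        · intro t
          rw [List.mem_filter, decide_eq_true_eq, hchar t, List.mem_append,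
            PySem.List.mem_pyRange_one, PySem.List.mem_pyRange_one, PySem.List.mem_pyRange_one]
          rw [e1 (t - 1 - c0), e1 (t - c0), e2 (t - 1 - c0), e2 (t - c0)]
          omega
      rw [this]


-- ===== VERDICT (by name: the statement is the Claim_ definition above) =====
theorem intersectSphere_spec : Claim_equal_intersectSphere := by
  intro nx ny nz centre r_sqr _hDom _hPre
  unfold Spec_intersectSphere
  simp only [intersectSphere, intersectSphere_alt]
  apply PySem.List.foldl_congr_mem
  intro acc z _
  apply PySem.List.foldl_congr_mem
  intro acc2 y _
  exact row_eq nx y z r_sqr centre _ _ _ rfl rfl rfl acc2
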